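-- pv_equiv track=rewrite | github.com/JamesLee-Jones/ChronoLog | backend/nlp.py | prune_metadata
-- ===== SOURCE A (Python) =====
-- def prune_metadata(unimportant_characters, interactions_overall, interactions_per_character):
--     for c in unimportant_characters:
--         if c in interactions_overall:
--             del interactions_overall[c]
--         if c in interactions_per_character:
--             del interactions_per_character[c]
--         for key in list(interactions_per_character.keys()):
--             if c in interactions_per_character[key]:
--                 del interactions_per_character[key][c]
--                 if not interactions_per_character[key]:
--                     del interactions_per_character[key]
--     return interactions_overall, interactions_per_character
-- ===== SOURCE B (Python) =====
-- def prune_metadata(unimportant_characters, interactions_overall, interactions_per_character):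
--     unimportant = set(unimportant_characters)
--     for k in list(interactions_overall):
--         if k in unimportant:
--             del interactions_overall[k]
--     for k in list(interactions_per_character):
--         if k in unimportant:
--             del interactions_per_character[k]
--             continue
--         sub = interactions_per_character[k]
--         if sub:
--             for k2 in list(sub):
--                 if k2 in unimportant:
--                     del sub[k2]
--             if not sub:
--                 del interactions_per_character[k]
--     return interactions_overall, interactions_per_character
-- ===== Notes on version B (the rewrite author's own statement) =====
-- stated objective: faster
-- what changed: A loops over every unimportant character and, for each one, rescans the whole per-character dict (and rescans each sub-dict via membership tests); B builds a set of unimportant characters once and makes a single pass over each dict, pruning every sub-dict once and deleting it only if it was non-empty and became empty.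
import Mathlib
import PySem

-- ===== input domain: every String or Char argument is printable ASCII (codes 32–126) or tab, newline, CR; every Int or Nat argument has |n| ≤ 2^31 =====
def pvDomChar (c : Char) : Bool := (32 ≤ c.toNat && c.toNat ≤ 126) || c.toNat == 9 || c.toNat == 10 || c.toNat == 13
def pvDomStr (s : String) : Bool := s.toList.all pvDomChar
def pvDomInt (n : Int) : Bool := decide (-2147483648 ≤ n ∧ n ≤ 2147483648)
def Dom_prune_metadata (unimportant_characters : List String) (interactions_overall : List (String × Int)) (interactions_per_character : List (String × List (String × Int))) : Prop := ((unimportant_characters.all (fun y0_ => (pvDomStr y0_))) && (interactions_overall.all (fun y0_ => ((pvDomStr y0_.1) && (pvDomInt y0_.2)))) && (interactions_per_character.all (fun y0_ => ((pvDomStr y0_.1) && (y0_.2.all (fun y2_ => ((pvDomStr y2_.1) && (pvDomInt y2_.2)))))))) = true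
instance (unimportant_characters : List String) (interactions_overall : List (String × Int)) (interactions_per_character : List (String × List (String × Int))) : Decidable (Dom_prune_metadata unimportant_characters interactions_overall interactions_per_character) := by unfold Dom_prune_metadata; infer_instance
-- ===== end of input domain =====

-- B builds the set of unimportant characters once and prunes each dict in a single pass,
-- instead of A's rescan of both dicts for every unimportant character; equivalence is about
-- the RETURN value (the Python originals mutate their dict arguments in place identically).

-- ===== PORT A =====
-- dicts are association lists with unique keys (Pre_); 'c in d' / 'del d[c]' / 'd[k]' below
-- are exact for unique keys
def pmContains {α : Type} (d : List (String × α)) (c : String) : Bool :=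
  d.any (fun p => p.1 == c)

def pmEraseKey {α : Type} (d : List (String × α)) (c : String) : List (String × α) :=
  d.filter (fun p => p.1 != c)

-- interactions_per_character[key]; default [] is never used under Pre_ (the key is present)
def pmGetD (d : List (String × List (String × Int))) (k : String) : List (String × Int) :=
  match d.find? (fun p => p.1 == k) with
  | some p => p.2
  | none => []

def pmSetVal (d : List (String × List (String × Int))) (k : String) (v : List (String × Int)) :
    List (String × List (String × Int)) :=
  d.map (fun p => if p.1 == k then (p.1, v) else p)

-- body of A's inner 'for key in list(interactions_per_character.keys())' loop
def pmInnerStep (c : String) (per : List (String × List (String × Int))) (key : String) :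
    List (String × List (String × Int)) :=
  let sub := pmGetD per key
  if pmContains sub c then
    let sub' := pmEraseKey sub c
    let per' := pmSetVal per key sub'
    if sub'.isEmpty then pmEraseKey per' key else per'
  else per

-- body of A's outer 'for c in unimportant_characters' loop
def pmStep (st : (List (String × Int)) × (List (String × List (String × Int)))) (c : String) :
    (List (String × Int)) × (List (String × List (String × Int))) :=
  let io := if pmContains st.1 c then pmEraseKey st.1 c else st.1
  let per := if pmContains st.2 c then pmEraseKey st.2 c else st.2
  let per := (per.map (·.1)).foldl (pmInnerStep c) per
  (io, per)

def prune_metadata (unimportant_characters : List String) (interactions_overall : List (String × Int)) (interactions_per_character : List (String × List (String × Int))) : (List (String × Int)) × (List (String × List (String × Int))) :=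
  unimportant_characters.foldl pmStep (interactions_overall, interactions_per_character)

-- ===== PORT B =====
def prune_metadata_alt (unimportant_characters : List String) (interactions_overall : List (String × Int)) (interactions_per_character : List (String × List (String × Int))) : (List (String × Int)) × (List (String × List (String × Int))) :=
  let s := PySem.Set.ofList unimportant_characters
  (interactions_overall.filter (fun p => !(s.contains p.1)),
   interactions_per_character.filterMap (fun p =>
     if s.contains p.1 then none
     else if p.2.isEmpty then some p
     else
       let v := p.2.filter (fun q => !(s.contains q.1))
       if v.isEmpty then none else some (p.1, v)))

-- ===== PRECONDITION & SPEC =====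
-- Pre_ only excludes association lists whose top-level keys repeat: a Python dict cannot have
-- duplicate keys, so such lists represent no input the Python functions can receive.
def Pre_prune_metadata (unimportant_characters : List String) (interactions_overall : List (String × Int)) (interactions_per_character : List (String × List (String × Int))) : Prop :=
  (interactions_per_character.map (·.1)).Nodup

instance (unimportant_characters : List String) (interactions_overall : List (String × Int)) (interactions_per_character : List (String × List (String × Int))) : Decidable (Pre_prune_metadata unimportant_characters interactions_overall interactions_per_character) := by unfold Pre_prune_metadata; infer_instance

def pvWitness_prune_metadata : List String × (List (String × Int)) × (List (String × List (String × Int))) :=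
  (["a", "b"], [("a", 1), ("c", 2)], [("a", [("x", 1)]), ("c", [("a", 3), ("y", 4)]), ("d", [("b", 5)])])

def Spec_prune_metadata (unimportant_characters : List String) (interactions_overall : List (String × Int)) (interactions_per_character : List (String × List (String × Int))) (out : (List (String × Int)) × (List (String × List (String × Int)))) : Prop := out = prune_metadata_alt unimportant_characters interactions_overall interactions_per_character
instance (unimportant_characters : List String) (interactions_overall : List (String × Int)) (interactions_per_character : List (String × List (String × Int))) (out : (List (String × Int)) × (List (String × List (String × Int)))) : Decidable (Spec_prune_metadata unimportant_characters interactions_overall interactions_per_character out) := by unfold Spec_prune_metadata; infer_instance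

-- ===== CLAIM (what is proved, stated in full; the proofs are below) =====
def Claim_equal_prune_metadata : Prop := ∀ (unimportant_characters : List String) (interactions_overall : List (String × Int)) (interactions_per_character : List (String × List (String × Int))), Dom_prune_metadata unimportant_characters interactions_overall interactions_per_character → Pre_prune_metadata unimportant_characters interactions_overall interactions_per_character → Spec_prune_metadata unimportant_characters interactions_overall interactions_per_character (prune_metadata unimportant_characters interactions_overall interactions_per_character)

-- ===== LEMMAS AND PROOFS =====

-- B's entry transform, parametrised by the plain key list (ofList only dedups; membership agrees)
def bEntry (s : List String) (p : String × List (String × Int)) :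
    Option (String × List (String × Int)) :=
  if s.contains p.1 then none
  else if p.2.isEmpty then some p
  else
    let v := p.2.filter (fun q => !(s.contains q.1))
    if v.isEmpty then none else some (p.1, v)

def bFilt (s : List String) (io : List (String × Int)) (per : List (String × List (String × Int))) :
    (List (String × Int)) × (List (String × List (String × Int))) :=
  (io.filter (fun p => !(s.contains p.1)), per.filterMap (bEntry s))

-- the effect of one inner iteration, entrywise
def eStep (c : String) (p : String × List (String × Int)) :
    Option (String × List (String × Int)) :=
  if pmContains p.2 c then
    let v := pmEraseKey p.2 c
    if v.isEmpty then none else some (p.1, v)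
  else some p

theorem setContains_eq (u : List String) (x : String) :
    (PySem.Set.ofList u).contains x = u.contains x := by
  simp [PySem.Set.mem_ofList]

theorem pm_alt_eq_bFilt (u : List String) (io : List (String × Int))
    (per : List (String × List (String × Int))) :
    prune_metadata_alt u io per = bFilt u io per := by
  unfold prune_metadata_alt bFilt bEntry
  simp only [setContains_eq]

theorem eraseKey_of_not_contains {α : Type} (d : List (String × α)) (c : String)
    (h : pmContains d c = false) : pmEraseKey d c = d := by
  simp only [pmContains, List.any_eq_false] at h
  refine List.filter_eq_self.mpr ?_
  intro p hp
  simpa using h p hp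

theorem eraseKey_append_notMem {α : Type} (pre rest : List (String × α)) (k : String)
    (v : α) (hp : k ∉ pre.map (·.1)) (hr : k ∉ rest.map (·.1)) :
    pmEraseKey (pre ++ (k, v) :: rest) k = pre ++ rest := by
  unfold pmEraseKey
  rw [List.filter_append, List.filter_cons]
  have h1 : pre.filter (fun p => p.1 != k) = pre := by
    refine List.filter_eq_self.mpr ?_
    intro p hpmem
    have : p.1 ≠ k := fun he => hp (he ▸ List.mem_map_of_mem hpmem)
    simpa using this
  have h2 : rest.filter (fun p => p.1 != k) = rest := by
    refine List.filter_eq_self.mpr ?_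
    intro p hpmem
    have : p.1 ≠ k := fun he => hr (he ▸ List.mem_map_of_mem hpmem)
    simpa using this
  rw [h1, h2]
  simp

theorem getD_append_notMem (pre rest : List (String × List (String × Int))) (k : String)
    (v : List (String × Int)) (hp : k ∉ pre.map (·.1)) :
    pmGetD (pre ++ (k, v) :: rest) k = v := by
  unfold pmGetD
  have h1 : pre.find? (fun p => p.1 == k) = none := by
    refine List.find?_eq_none.mpr ?_
    intro p hpmem
    have : p.1 ≠ k := fun he => hp (he ▸ List.mem_map_of_mem hpmem)
    simpa using this
  rw [List.find?_append, h1]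
  simp

theorem setVal_append_notMem (pre rest : List (String × List (String × Int))) (k : String)
    (v v' : List (String × Int)) (hp : k ∉ pre.map (·.1)) (hr : k ∉ rest.map (·.1)) :
    pmSetVal (pre ++ (k, v) :: rest) k v' = pre ++ (k, v') :: rest := by
  unfold pmSetVal
  rw [List.map_append, List.map_cons]
  have h1 : pre.map (fun p => if p.1 == k then (p.1, v') else p) = pre := by
    rw [List.map_congr_left (g := id), List.map_id]
    intro p hpmem
    have : p.1 ≠ k := fun he => hp (he ▸ List.mem_map_of_mem hpmem)
    simp [this]
  have h2 : rest.map (fun p => if p.1 == k then (p.1, v') else p) = rest := by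
    rw [List.map_congr_left (g := id), List.map_id]
    intro p hpmem
    have : p.1 ≠ k := fun he => hr (he ▸ List.mem_map_of_mem hpmem)
    simp [this]
  rw [h1, h2]
  simp

theorem innerFold (c : String) (per pre : List (String × List (String × Int)))
    (h : ((pre ++ per).map (·.1)).Nodup) :
    (per.map (·.1)).foldl (pmInnerStep c) (pre ++ per) = pre ++ per.filterMap (eStep c) := by
  induction per generalizing pre with
  | nil => simp
  | cons p rest ih =>
    obtain ⟨k, v⟩ := p
    have hkeys := h
    rw [List.map_append, List.map_cons] at hkeys
    have hp : k ∉ pre.map (·.1) := by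
      intro hmem
      exact (List.disjoint_of_nodup_append hkeys) hmem (List.mem_cons_self)
    have hnr := (List.nodup_append.mp hkeys).2.1
    have hr : k ∉ rest.map (·.1) := (List.nodup_cons.mp hnr).1
    rw [List.map_cons, List.foldl_cons]
    have hget : pmGetD (pre ++ (k, v) :: rest) k = v := getD_append_notMem pre rest k v hp
    rw [List.filterMap_cons]
    by_cases hc : pmContains v c = true
    · have hsv : pmSetVal (pre ++ (k, v) :: rest) k (pmEraseKey v c) =
          pre ++ (k, pmEraseKey v c) :: rest := setVal_append_notMem pre rest k v _ hp hr
      by_cases he : (pmEraseKey v c).isEmpty = true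
      · have hstep : pmInnerStep c (pre ++ (k, v) :: rest) k = pre ++ rest := by
          unfold pmInnerStep
          rw [hget]
          simp only [hc, if_true, hsv, he, if_true]
          exact eraseKey_append_notMem pre rest k _ hp hr
        have h0 : eStep c (k, v) = none := by
          unfold eStep
          simp only [hc, if_true, he, if_true]
        have hnd : ((pre ++ rest).map (·.1)).Nodup := by
          rw [List.map_append]
          refine hkeys.sublist ?_
          exact (List.sublist_cons_self _ _).append_left _
        rw [hstep, h0, ih pre hnd]
      · have hstep : pmInnerStep c (pre ++ (k, v) :: rest) k =
            pre ++ (k, pmEraseKey v c) :: rest := by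
          unfold pmInnerStep
          rw [hget]
          simp only [hc, if_true, hsv, he]
          simp
        have h0 : eStep c (k, v) = some (k, pmEraseKey v c) := by
          unfold eStep
          simp only [hc, if_true, he]
          simp
        have hnd : (((pre ++ [(k, pmEraseKey v c)]) ++ rest).map (·.1)).Nodup := by
          simpa using hkeys
        rw [hstep, h0,
          show pre ++ (k, pmEraseKey v c) :: rest = (pre ++ [(k, pmEraseKey v c)]) ++ rest by simp,
          ih (pre ++ [(k, pmEraseKey v c)]) hnd]
        simp
    · have hstep : pmInnerStep c (pre ++ (k, v) :: rest) k = pre ++ (k, v) :: rest := by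
        unfold pmInnerStep
        rw [hget]
        simp only [hc, Bool.false_eq_true, if_false]
      have h0 : eStep c (k, v) = some (k, v) := by
        unfold eStep
        simp only [hc, Bool.false_eq_true, if_false]
      have hnd : (((pre ++ [(k, v)]) ++ rest).map (·.1)).Nodup := by simpa using hkeys
      rw [hstep, h0,
        show pre ++ (k, v) :: rest = (pre ++ [(k, v)]) ++ rest by simp,
        ih (pre ++ [(k, v)]) hnd]
      simp

theorem keys_filterMap_sublist (f : (String × List (String × Int)) → Option (String × List (String × Int)))
    (hf : ∀ p q, f p = some q → q.1 = p.1)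
    (l : List (String × List (String × Int))) :
    ((l.filterMap f).map (·.1)).Sublist (l.map (·.1)) := by
  induction l with
  | nil => simp
  | cons p rest ih =>
    rw [List.filterMap_cons]
    cases hfp : f p with
    | none =>
      rw [List.map_cons]
      exact ih.trans (List.sublist_cons_self _ _)
    | some q =>
      rw [List.map_cons, List.map_cons, hf p q hfp]
      exact ih.cons_cons _

theorem step_filter {α : Type} (d : List (String × α)) (c : String) :
    (if pmContains d c then pmEraseKey d c else d) = pmEraseKey d c := by
  by_cases hc : pmContains d c = true
  · simp [hc]
  · simp only [Bool.not_eq_true] at hc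
    rw [eraseKey_of_not_contains d c hc]
    simp

theorem pmStep_eq (c : String) (io : List (String × Int))
    (per : List (String × List (String × Int))) (h : (per.map (·.1)).Nodup) :
    pmStep (io, per) c = (pmEraseKey io c, (pmEraseKey per c).filterMap (eStep c)) := by
  have hper1 : ((pmEraseKey per c).map (·.1)).Nodup :=
    h.sublist (List.Sublist.map _ List.filter_sublist)
  have hfold := innerFold c (pmEraseKey per c) [] (by simpa using hper1)
  unfold pmStep
  simp only [step_filter]
  rw [show pmEraseKey per c = [] ++ pmEraseKey per c by simp] at hfold
  simpa using hfold

theorem entry_comp (c : String) (u : List String) (p : String × List (String × Int)) :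
    (if p.1 != c then (eStep c p).bind (bEntry u) else none) = bEntry (c :: u) p := by
  obtain ⟨k, v⟩ := p
  by_cases hk : k = c
  · subst hk
    simp [bEntry]
  · have hbk : (k != c) = true := by simpa using hk
    have hcontains : (c :: u).contains k = u.contains k := by
      simp [hk]
    rw [if_pos hbk]
    by_cases hc : pmContains v c = true
    · have hvne : v.isEmpty = false := by
        simp only [pmContains, List.any_eq_true] at hc
        obtain ⟨q, hq, _⟩ := hc
        cases v with
        | nil => exact absurd hq List.not_mem_nil
        | cons a t => rfl
      by_cases he : (pmEraseKey v c).isEmpty = true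
      · have hall : ∀ q ∈ v, q.1 = c := by
          intro q hq
          by_contra hne
          have hmem : q ∈ v.filter (fun q => q.1 != c) :=
            List.mem_filter.mpr ⟨hq, by simpa using hne⟩
          rw [pmEraseKey] at he
          rw [List.isEmpty_iff] at he
          rw [he] at hmem
          exact absurd hmem List.not_mem_nil
        have hfe : v.filter (fun q => !((c :: u).contains q.1)) = [] := by
          rw [List.filter_eq_nil_iff]
          intro q hq
          simp [hall q hq]
        have h0 : eStep c (k, v) = none := by
          unfold eStep
          simp only [hc, if_true, he, if_true]
        rw [h0]
        unfold bEntry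
        simp only [hcontains, hvne, hfe]
        simp
      · have hfil : (pmEraseKey v c).filter (fun q => !(u.contains q.1)) =
            v.filter (fun q => !((c :: u).contains q.1)) := by
          rw [pmEraseKey, List.filter_filter]
          apply List.filter_congr
          intro q hq
          simp [Bool.and_comm, bne, beq_eq_decide, Bool.not_or]
        have hene : (pmEraseKey v c).isEmpty = false := by simpa using he
        have h0 : eStep c (k, v) = some (k, pmEraseKey v c) := by
          unfold eStep
          simp only [hc, if_true, he]
          simp
        rw [h0]
        show bEntry u (k, pmEraseKey v c) = bEntry (c :: u) (k, v)
        unfold bEntry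
        by_cases hku : u.contains k = true
        · simp only [hcontains, hku, if_true]
        · have hku' : u.contains k = false := by simpa using hku
          simp only [hcontains, hku', Bool.false_eq_true, if_false, hene, hvne, hfil]
    · have hc' : pmContains v c = false := by simpa using hc
      have hnc : ∀ q ∈ v, (q.1 == c) = false := by
        simp only [pmContains, List.any_eq_false] at hc'
        exact fun q hq => by simpa using hc' q hq
      have hfil : v.filter (fun q => !(u.contains q.1)) =
          v.filter (fun q => !((c :: u).contains q.1)) := by
        apply List.filter_congr
        intro q hq
        have hq1 : (q.1 == c) = false := hnc q hq
        have hq2 : q.1 ≠ c := by simpa using hq1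
        simp [hq2]
      have h0 : eStep c (k, v) = some (k, v) := by
        unfold eStep
        simp only [hc', Bool.false_eq_true, if_false]
      rw [h0]
      show bEntry u (k, v) = bEntry (c :: u) (k, v)
      unfold bEntry
      simp only [hcontains, hfil]

theorem step_bFilt (c : String) (u : List String) (io : List (String × Int))
    (per : List (String × List (String × Int))) (h : (per.map (·.1)).Nodup) :
    bFilt u (pmStep (io, per) c).1 (pmStep (io, per) c).2 = bFilt (c :: u) io per := by
  rw [pmStep_eq c io per h]
  unfold bFilt
  refine Prod.ext ?_ ?_
  · show (pmEraseKey io c).filter _ = _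
    rw [pmEraseKey, List.filter_filter]
    apply List.filter_congr
    intro q hq
    simp [Bool.and_comm, bne, beq_eq_decide, Bool.not_or]
  · show ((pmEraseKey per c).filterMap (eStep c)).filterMap (bEntry u) = _
    rw [List.filterMap_filterMap, pmEraseKey, List.filterMap_filter]
    show List.filterMap (fun x => if (x.1 != c) = true then (eStep c x).bind (bEntry u) else none) per
      = per.filterMap (bEntry (c :: u))
    exact congrArg (fun g => List.filterMap g per) (funext (fun p => entry_comp c u p))

theorem bEntry_nil (p : String × List (String × Int)) : bEntry [] p = some p := by
  unfold bEntry
  by_cases hp : p.2.isEmpty = true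
  · simp [hp]
  · simp [hp]

theorem main_eq (u : List String) (io : List (String × Int))
    (per : List (String × List (String × Int))) (h : (per.map (·.1)).Nodup) :
    prune_metadata u io per = bFilt u io per := by
  induction u generalizing io per with
  | nil =>
    unfold prune_metadata bFilt
    rw [List.foldl_nil]
    refine Prod.ext ?_ ?_
    · simp
    · show per = per.filterMap (bEntry [])
      rw [funext bEntry_nil, List.filterMap_some]
  | cons c rest ih =>
    unfold prune_metadata
    rw [List.foldl_cons]
    have hpe := pmStep_eq c io per h
    have hnd2 : ((pmStep (io, per) c).2.map (·.1)).Nodup := by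
      rw [hpe]
      have hper1 : ((pmEraseKey per c).map (·.1)).Nodup :=
        h.sublist (List.Sublist.map _ List.filter_sublist)
      refine hper1.sublist (keys_filterMap_sublist (eStep c) ?_ _)
      intro p q hpq
      unfold eStep at hpq
      by_cases hc : pmContains p.2 c = true
      · simp only [hc, if_true] at hpq
        by_cases he : (pmEraseKey p.2 c).isEmpty = true
        · simp [he] at hpq
        · simp only [he] at hpq
          rw [← Option.some_inj.mp hpq]
      · simp only [hc, Bool.false_eq_true, if_false, Option.some.injEq] at hpq
        exact hpq ▸ rfl
    have hmid : List.foldl pmStep (pmStep (io, per) c) rest =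
        bFilt rest (pmStep (io, per) c).1 (pmStep (io, per) c).2 :=
      ih (pmStep (io, per) c).1 (pmStep (io, per) c).2 hnd2
    rw [hmid, step_bFilt c rest io per h]

-- ===== VERDICT (by name: the statement is the Claim_ definition above) =====
theorem prune_metadata_spec : Claim_equal_prune_metadata := by
  intro u io per _ hpre
  unfold Spec_prune_metadata
  rw [pm_alt_eq_bFilt]
  exact main_eq u io per hpre
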